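-- pv_equiv track=rewrite | github.com/luolin19850304/Computational-Creativity | code/corpus.py | make_index
-- ===== SOURCE A (Python) =====
-- from typing import Any, Dict, Iterator, List, Match, Optional, Set, Tuple, Union
--
-- def make_index(xs: List[Any]) -> Tuple[List[Any], Dict[Any, int]]:
--     """Make index and reverse index.
--     """
--     d: Dict[Any, int] = dict()
--     a: List[Any] = []
--     idx = 0
--     for x in xs:
--         if d.get(x, None) is None:
--             d[x] = idx
--             a.append(x)
--             idx += 1
--     return a, d
-- ===== SOURCE B (Python) =====
-- def make_index(xs):
--     """Make index and reverse index."""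
--     first = {}
--     for i, x in reversed(list(enumerate(xs))):
--         first[x] = i
--     a = sorted(first, key=lambda x: first[x])
--     d = {x: i for i, x in enumerate(a)}
--     return a, d
-- ===== Notes on version B (the rewrite author's own statement) =====
-- stated objective: alternative
-- what changed: Replaces A's single forward dedup loop (dict lookup + manual index counter) by a different algorithm: a reverse overwrite pass records each value's first-occurrence index, the deduplicated list is obtained by sorting the distinct keys by that index, and the index dict is rebuilt from enumerate.
import Mathlib
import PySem

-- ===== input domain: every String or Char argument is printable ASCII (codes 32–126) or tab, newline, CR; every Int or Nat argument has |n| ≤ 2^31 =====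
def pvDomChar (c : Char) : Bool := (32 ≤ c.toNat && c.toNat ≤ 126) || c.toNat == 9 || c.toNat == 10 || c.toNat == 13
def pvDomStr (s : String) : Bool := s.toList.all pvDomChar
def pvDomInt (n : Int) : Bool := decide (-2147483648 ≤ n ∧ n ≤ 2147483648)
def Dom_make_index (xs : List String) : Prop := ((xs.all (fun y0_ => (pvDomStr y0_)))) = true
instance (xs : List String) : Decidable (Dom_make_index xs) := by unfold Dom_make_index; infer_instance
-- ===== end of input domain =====

-- B replaces A's single forward dedup loop by a different algorithm: a reverse overwrite pass
-- records each value's FIRST index, the deduplicated list is obtained by SORTING the distinct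
-- keys by that index, and the index dict is rebuilt from enumerate — alternative, not faster.

-- ===== PORT A =====
-- one fused loop: dict lookup decides dedup, index counter carried alongside
def make_index (xs : List String) : List String × (List (String × Int)) :=
  let st := xs.foldl
    (fun (s : PySem.Dict String Int × List String × Int) x =>
      if (s.1.get? x) = none then (s.1.insert x s.2.2, s.2.1 ++ [x], s.2.2 + 1) else s)
    (PySem.Dict.empty, [], 0)
  (st.2.1, st.1.items)

-- ===== PORT B =====
-- B: reverse overwrite pass 'for i, x in reversed(list(enumerate(xs))): first[x] = i' leaves
-- first[x] = first index of x; a = sorted(first, key=lambda x: first[x]); d from enumerate(a).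
-- (Python's first[x] raises KeyError on a missing key; sorted applies the key only to keys of
-- `first`, where get? is always some, so porting it as (get? …).getD 0 is exact.)
def make_index_alt (xs : List String) : List String × (List (String × Int)) :=
  let first := (PySem.List.enumerate xs 0).reverse.foldl
      (fun (d : PySem.Dict String Int) p => d.insert p.2 p.1) PySem.Dict.empty
  let a := PySem.List.sorted first.keys (fun x => (first.get? x).getD 0)
  let d := (PySem.List.enumerate a 0).foldl
      (fun (d : PySem.Dict String Int) p => d.insert p.2 p.1) PySem.Dict.empty
  (a, d.items)

-- ===== PRECONDITION & SPEC =====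
def Spec_make_index (xs : List String) (out : List String × (List (String × Int))) : Prop := out = make_index_alt xs
instance (xs : List String) (out : List String × (List (String × Int))) : Decidable (Spec_make_index xs out) := by unfold Spec_make_index; infer_instance

-- ===== CLAIM (what is proved, stated in full; the proofs are below) =====
def Claim_equal_make_index : Prop := ∀ (xs : List String), Dom_make_index xs → Spec_make_index xs (make_index xs)

-- ===== LEMMAS AND PROOFS =====

-- A's loop state: the dict is exactly the enumerate-index of the accumulated list
lemma a_inv (xs : List String) : ∀ (a : List String) (d : PySem.Dict String Int) (idx : Int),
    d.items = (PySem.List.enumerate a 0).map (fun p => (p.2, p.1)) →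
    idx = (a.length : Int) →
    xs.foldl
      (fun (s : PySem.Dict String Int × List String × Int) x =>
        if (s.1.get? x) = none then (s.1.insert x s.2.2, s.2.1 ++ [x], s.2.2 + 1) else s)
      (d, a, idx)
    = (⟨(PySem.List.enumerate (xs.foldl PySem.Set.add a) 0).map (fun p => (p.2, p.1))⟩,
       xs.foldl PySem.Set.add a, ((xs.foldl PySem.Set.add a).length : Int)) := by
  induction xs with
  | nil =>
    intro a d idx hd hidx
    simp only [List.foldl_nil]
    cases d
    simp_all
  | cons x xs ih =>
    intro a d idx hd hidx
    have hkeys : d.keys = a := by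
      simp only [PySem.Dict.keys, hd, List.map_map]
      exact PySem.List.map_snd_enumerate a 0
    have hget : (d.get? x = none) ↔ x ∉ a := by
      rw [PySem.Dict.get?_eq_none_iff_not_mem_keys, hkeys]
    simp only [List.foldl_cons]
    by_cases hx : x ∈ a
    · have hne : ¬ (d.get? x = none) := by simp [hget, hx]
      rw [if_neg hne]
      have hadd : PySem.Set.add a x = a := by
        simp [PySem.Set.add, PySem.Set.contains, List.contains_eq_mem, hx]
      rw [hadd]
      exact ih a d idx hd hidx
    · rw [if_pos (hget.mpr hx)]
      have hadd : PySem.Set.add a x = a ++ [x] := by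
        simp [PySem.Set.add, PySem.Set.contains, List.contains_eq_mem, hx]
      have hnc : d.contains x = false := by
        rw [PySem.Dict.contains_eq_decide_mem_keys, hkeys]; simp [hx]
      have hins : (d.insert x idx).items
          = (PySem.List.enumerate (a ++ [x]) 0).map (fun p => (p.2, p.1)) := by
        rw [PySem.Dict.items_insert_of_not_contains _ _ hnc, hd,
            PySem.List.enumerate_append]
        simp [PySem.List.enumerate_cons, PySem.List.enumerate_nil, hidx]
      rw [hadd]
      have hlen : idx + 1 = ((a ++ [x]).length : Int) := by
        simp [hidx]
      exact ih (a ++ [x]) (d.insert x idx) (idx + 1) hins hlen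

-- a dict built by inserting distinct fresh keys has exactly those items
lemma b_dict (a : List String) (hnd : a.Nodup) :
    ((PySem.List.enumerate a 0).foldl
      (fun (d : PySem.Dict String Int) p => d.insert p.2 p.1) PySem.Dict.empty).items
    = (PySem.List.enumerate a 0).map (fun p => (p.2, p.1)) := by
  have h := PySem.Dict.items_foldl_insert_fresh (PySem.List.enumerate a 0)
    (fun p => p.2) (fun p => p.1) (PySem.Dict.empty)
    (by intro p _; exact PySem.Dict.contains_empty _)
    (by rw [PySem.List.map_snd_enumerate]; exact hnd)
  simpa using h

-- lookup in the dict produced by the reverse overwrite pass = FIRST matching pair of ps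
lemma get?_revfold (ps : List (Int × String)) (d : PySem.Dict String Int) (k : String) :
    (ps.reverse.foldl (fun d p => d.insert p.2 p.1) d).get? k
    = (ps.find? (fun p => p.2 == k)).elim (d.get? k) (fun p => some p.1) := by
  induction ps generalizing d with
  | nil => simp
  | cons p t ih =>
    simp only [List.reverse_cons, List.foldl_append, List.foldl_cons, List.foldl_nil]
    rw [PySem.Dict.get?_insert]
    by_cases h : p.2 = k
    · rw [List.find?_cons_of_pos (by simp [h]), if_pos h.symm]
      simp
    · rw [List.find?_cons_of_neg (by simp [h]), if_neg (fun hk => h hk.symm)]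
      exact ih d

-- the first matching pair of enumerate is the first occurrence index
lemma find?_enumerate (xs : List String) : ∀ (s : Int) (x : String), x ∈ xs →
    (PySem.List.enumerate xs s).find? (fun p => p.2 == x)
      = some (s + (xs.idxOf x : Int), x) := by
  induction xs with
  | nil => intro s x hx; cases hx
  | cons y t ih =>
    intro s x hx
    rw [PySem.List.enumerate_cons]
    by_cases h : y = x
    · rw [List.find?_cons_of_pos (by simp [h])]
      simp [h, List.idxOf_cons_self]
    · have hx' : x ∈ t := by cases hx with
        | head => exact absurd rfl h
        | tail _ h' => exact h'
      rw [List.find?_cons_of_neg (by simp [h]), ih (s + 1) x hx']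
      have hidx : List.idxOf x (y :: t) = (List.idxOf x t).succ :=
        List.idxOf_cons_ne t h
      rw [hidx]
      push_cast
      ring_nf

-- first occurrences are listed in strictly increasing index order
lemma pairwise_idxOf (xs : List String) :
    (PySem.Set.ofList xs).Pairwise (fun a b => xs.idxOf a < xs.idxOf b) := by
  induction xs with
  | nil => simp [PySem.Set.ofList_nil]
  | cons x t ih =>
    rw [PySem.Set.ofList_cons]
    constructor
    · intro b hb
      have hbne : b ≠ x := by
        simp only [PySem.Set.discard, List.mem_filter] at hb
        simpa using hb.2
      rw [List.idxOf_cons_self, List.idxOf_cons_ne t hbne.symm]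
      omega
    · have hsub : List.Sublist ((PySem.Set.ofList t).discard x) (PySem.Set.ofList t) :=
        List.filter_sublist
      have h1 := ih.sublist hsub
      refine h1.imp_of_mem ?_
      intro a b ha hb hab
      have hane : a ≠ x := by
        simp only [PySem.Set.discard, List.mem_filter] at ha
        simpa using ha.2
      have hbne : b ≠ x := by
        simp only [PySem.Set.discard, List.mem_filter] at hb
        simpa using hb.2
      rw [List.idxOf_cons_ne t hane.symm, List.idxOf_cons_ne t hbne.symm]
      omega

-- the sorted pass of B returns exactly the first-occurrence dedup of xs
lemma b_sorted (xs : List String) :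
    (PySem.List.sorted
      ((PySem.List.enumerate xs 0).reverse.foldl
        (fun (d : PySem.Dict String Int) p => d.insert p.2 p.1) PySem.Dict.empty).keys
      (fun x => ((((PySem.List.enumerate xs 0).reverse.foldl
        (fun (d : PySem.Dict String Int) p => d.insert p.2 p.1) PySem.Dict.empty)).get? x).getD 0))
    = PySem.Set.ofList xs := by
  set first := (PySem.List.enumerate xs 0).reverse.foldl
      (fun (d : PySem.Dict String Int) p => d.insert p.2 p.1) PySem.Dict.empty with hfirst
  have hget : ∀ x ∈ xs, first.get? x = some ((xs.idxOf x : Int)) := by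
    intro x hx
    rw [hfirst, get?_revfold, find?_enumerate xs 0 x hx]
    simp
  have hkeys : first.keys = PySem.Set.ofList xs.reverse := by
    rw [hfirst, PySem.Dict.keys_foldl_insert_key ((PySem.List.enumerate xs 0).reverse)
      (fun p : Int × String => p.2) (fun _ p => p.1) PySem.Dict.empty]
    rw [List.map_reverse, PySem.List.map_snd_enumerate]
    simp [PySem.Dict.keys_empty, PySem.Set.update_nil_left]
  apply PySem.List.sorted_eq_of_perm_of_pairwise_lt
  · rw [hkeys]
    rw [List.perm_ext_iff_of_nodup (PySem.Set.nodup_ofList _) (PySem.Set.nodup_ofList _)]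
    intro a
    simp [PySem.Set.mem_ofList]
  · have hp := pairwise_idxOf xs
    refine hp.imp_of_mem ?_
    intro a b ha hb hab
    have ha' : a ∈ xs := (PySem.Set.mem_ofList _ _).mp ha
    have hb' : b ∈ xs := (PySem.Set.mem_ofList _ _).mp hb
    rw [hget a ha', hget b hb']
    simpa using hab

-- ===== VERDICT (by name: the statement is the Claim_ definition above) =====
theorem make_index_spec : Claim_equal_make_index := by
  unfold Claim_equal_make_index
  intro xs _
  unfold Spec_make_index make_index make_index_alt
  have ha := a_inv xs [] PySem.Dict.empty 0 rfl rfl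
  rw [ha]
  have hofl : xs.foldl PySem.Set.add [] = PySem.Set.ofList xs :=
    (PySem.Set.ofList_eq_foldl xs).symm
  have hb := b_sorted xs
  simp only [hb]
  have hnd : (PySem.Set.ofList xs).Nodup := PySem.Set.nodup_ofList xs
  rw [b_dict _ hnd, hofl]
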